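-- pv_equiv track=rewrite | github.com/ArjaanBuijk/CarND_Traffic_Sign_Classifier_Project | Traffic_Sign_Classifier.py | prediction_counts
-- ===== SOURCE A (Python) =====
-- def prediction_counts(labels, predictions):
--     count_labels         = {}
--     count_true_positive  = {}
--     count_false_positive = {}
--     count_false_negative = {}
--
--     for y, p in zip(labels, predictions):
--         count_labels[y] = count_labels.get(y,0) + 1
--         if p == y:
--             count_true_positive[y] = count_true_positive.get(y,0) + 1
--         else:
--             count_false_positive[p] = count_false_positive.get(p,0) + 1
--             count_false_negative[y] = count_false_negative.get(y,0) + 1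
--
--     return (count_labels,
--             count_true_positive, count_false_positive, count_false_negative)
-- ===== SOURCE B (Python) =====
-- def _tally(seq):
--     counts = {}
--     for x in seq:
--         counts[x] = counts.get(x, 0) + 1
--     return counts
--
-- def prediction_counts(labels, predictions):
--     pairs = list(zip(labels, predictions))
--     return (_tally(y for y, p in pairs),
--             _tally(y for y, p in pairs if p == y),
--             _tally(p for y, p in pairs if p != y),
--             _tally(y for y, p in pairs if p != y))
-- ===== Notes on version B (the rewrite author's own statement) =====
-- stated objective: idiomatic
-- what changed: Replaces the single loop accumulating four dicts at once with a tally helper applied to four filtered views of zip(labels, predictions), one independent pass per returned dict.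
import Mathlib
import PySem

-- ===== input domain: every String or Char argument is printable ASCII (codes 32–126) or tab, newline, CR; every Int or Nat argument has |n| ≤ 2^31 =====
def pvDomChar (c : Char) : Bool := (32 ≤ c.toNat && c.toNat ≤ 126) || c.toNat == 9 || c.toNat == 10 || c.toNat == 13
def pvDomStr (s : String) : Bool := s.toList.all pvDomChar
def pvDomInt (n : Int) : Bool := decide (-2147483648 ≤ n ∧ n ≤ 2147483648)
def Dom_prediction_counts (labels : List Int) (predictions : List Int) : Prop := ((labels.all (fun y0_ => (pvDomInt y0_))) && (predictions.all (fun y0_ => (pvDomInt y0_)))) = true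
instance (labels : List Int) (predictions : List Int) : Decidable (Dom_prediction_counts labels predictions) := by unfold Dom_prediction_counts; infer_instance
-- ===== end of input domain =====

-- B tallies four filtered views of zip(labels, predictions) in independent passes instead of A's single four-dict loop (idiomatic decomposition, same cost).

-- ===== PORT A =====
-- one loop over zip(labels, predictions) threading four dicts
def pvStepA (s : PySem.Dict Int Int × PySem.Dict Int Int × PySem.Dict Int Int × PySem.Dict Int Int)
    (yp : Int × Int) :
    PySem.Dict Int Int × PySem.Dict Int Int × PySem.Dict Int Int × PySem.Dict Int Int :=
  let cl := s.1.insert yp.1 (s.1.getD yp.1 0 + 1)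
  if yp.2 == yp.1 then
    (cl, s.2.1.insert yp.1 (s.2.1.getD yp.1 0 + 1), s.2.2.1, s.2.2.2)
  else
    (cl, s.2.1, s.2.2.1.insert yp.2 (s.2.2.1.getD yp.2 0 + 1),
         s.2.2.2.insert yp.1 (s.2.2.2.getD yp.1 0 + 1))

def prediction_counts (labels : List Int) (predictions : List Int) : (List (Int × Int)) × (List (Int × Int)) × (List (Int × Int)) × (List (Int × Int)) :=
  let st := (labels.zip predictions).foldl pvStepA
    (PySem.Dict.empty, PySem.Dict.empty, PySem.Dict.empty, PySem.Dict.empty)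
  (st.1.items, st.2.1.items, st.2.2.1.items, st.2.2.2.items)

-- ===== PORT B =====
-- _tally: one counting dict built by one loop over a sequence
def pvTally (xs : List Int) : PySem.Dict Int Int :=
  xs.foldl (fun d x => d.insert x (d.getD x 0 + 1)) PySem.Dict.empty

def prediction_counts_alt (labels : List Int) (predictions : List Int) : (List (Int × Int)) × (List (Int × Int)) × (List (Int × Int)) × (List (Int × Int)) :=
  let pairs := labels.zip predictions
  ((pvTally (pairs.map (·.1))).items,
   (pvTally ((pairs.filter (fun yp => yp.2 == yp.1)).map (·.1))).items,
   (pvTally ((pairs.filter (fun yp => yp.2 != yp.1)).map (·.2))).items,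
   (pvTally ((pairs.filter (fun yp => yp.2 != yp.1)).map (·.1))).items)

-- ===== PRECONDITION & SPEC =====
def Spec_prediction_counts (labels : List Int) (predictions : List Int) (out : (List (Int × Int)) × (List (Int × Int)) × (List (Int × Int)) × (List (Int × Int))) : Prop := out = prediction_counts_alt labels predictions
instance (labels : List Int) (predictions : List Int) (out : (List (Int × Int)) × (List (Int × Int)) × (List (Int × Int)) × (List (Int × Int))) : Decidable (Spec_prediction_counts labels predictions out) := by unfold Spec_prediction_counts; infer_instance

-- ===== CLAIM (what is proved, stated in full; the proofs are below) =====
def Claim_equal_prediction_counts : Prop := ∀ (labels : List Int) (predictions : List Int), Dom_prediction_counts labels predictions → Spec_prediction_counts labels predictions (prediction_counts labels predictions)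

-- ===== LEMMAS AND PROOFS =====

def pvTallyFrom (d : PySem.Dict Int Int) (xs : List Int) : PySem.Dict Int Int :=
  xs.foldl (fun d x => d.insert x (d.getD x 0 + 1)) d

-- invariant of A's loop: its four-dict state is four independent tallies of filtered views
theorem pvFoldA_eq (pairs : List (Int × Int))
    (d1 d2 d3 d4 : PySem.Dict Int Int) :
    pairs.foldl pvStepA (d1, d2, d3, d4) =
      (pvTallyFrom d1 (pairs.map (·.1)),
       pvTallyFrom d2 ((pairs.filter (fun yp => yp.2 == yp.1)).map (·.1)),
       pvTallyFrom d3 ((pairs.filter (fun yp => yp.2 != yp.1)).map (·.2)),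
       pvTallyFrom d4 ((pairs.filter (fun yp => yp.2 != yp.1)).map (·.1))) := by
  induction pairs generalizing d1 d2 d3 d4 with
  | nil => simp [pvTallyFrom]
  | cons yp rest ih =>
    by_cases h : yp.2 = yp.1 <;>
      simp [pvStepA, ih, pvTallyFrom, h]

-- ===== VERDICT (by name: the statement is the Claim_ definition above) =====
theorem prediction_counts_spec : Claim_equal_prediction_counts := by
  intro labels predictions _
  show _ = _
  simp [prediction_counts, prediction_counts_alt, pvFoldA_eq, pvTally, pvTallyFrom]
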